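-- pv_equiv track=rewrite | github.com/edetruth/shanghai-tracker | ml/pimc/engine.py | is_valid_run
-- ===== SOURCE A (Python) =====
-- JOKER_INT: int = 64
--
-- def _can_form_run(sorted_ranks: list, jokers: int) -> bool:
--     if not sorted_ranks:
--         return jokers >= 4
--     span = sorted_ranks[-1] - sorted_ranks[0] + 1
--     gaps = span - len(sorted_ranks)
--     return gaps <= jokers and len(sorted_ranks) + jokers >= 4
--
-- def is_valid_run(cards: list) -> bool:
--     """4+ same suit consecutive; ace low or high; all-joker run valid."""
--     n = len(cards)
--     if n < 4:
--         return False
--     suit = -1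
--     ranks = []
--     joker_count = 0
--     for c in cards:
--         if c >= JOKER_INT:
--             joker_count += 1
--         else:
--             s, r = c >> 4, c & 15
--             if suit == -1:
--                 suit = s
--             elif s != suit:
--                 return False
--             ranks.append(r)
--     if not ranks:
--         return True           # all-joker run
--     ranks.sort()
--     if len(set(ranks)) != len(ranks):
--         return False          # duplicate ranks
--     if _can_form_run(ranks, joker_count):
--         return True
--     if 1 in ranks:            # try ace-high
--         hi = sorted(14 if r == 1 else r for r in ranks)
--         return _can_form_run(hi, joker_count)
--     return False
-- ===== SOURCE B (Python) =====
-- def is_valid_run(cards: list) -> bool: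
--     """4+ same suit consecutive; ace low or high; all-joker run valid."""
--     if len(cards) < 4:
--         return False
--     suit = None
--     seen = []
--     jokers = 0
--     for c in cards:
--         if c >= 64:
--             jokers += 1
--         else:
--             s = c >> 4
--             if suit is None:
--                 suit = s
--             elif s != suit:
--                 return False
--             r = c & 15
--             if r in seen:
--                 return False
--             seen.append(r)
--     if not seen:
--         return True
--     total = len(seen) + jokers
--     if total < 4:
--         return False
--     for lo in range(16):
--         hi = lo + total - 1
--         if all(lo <= r <= hi or (r == 1 and lo <= 14 <= hi) for r in seen):
--             return True
--     return False
-- ===== Notes on version B (the rewrite author's own statement) =====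
-- stated objective: alternative
-- what changed: B drops A's sort/set/span-arithmetic entirely: duplicates are rejected inside the classifying pass via a seen-ranks list (so B can stop early), and instead of computing span and gaps (with an ace-high remap-and-recompute retry) B brute-force scans the 16 possible rank windows of length count+jokers and accepts iff some window covers every rank, the ace being allowed to sit at position 14.
-- outside the precondition, e.g. on is_valid_run([-12, 1, 2, 3]): A returns True, B returns False
import Mathlib
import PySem

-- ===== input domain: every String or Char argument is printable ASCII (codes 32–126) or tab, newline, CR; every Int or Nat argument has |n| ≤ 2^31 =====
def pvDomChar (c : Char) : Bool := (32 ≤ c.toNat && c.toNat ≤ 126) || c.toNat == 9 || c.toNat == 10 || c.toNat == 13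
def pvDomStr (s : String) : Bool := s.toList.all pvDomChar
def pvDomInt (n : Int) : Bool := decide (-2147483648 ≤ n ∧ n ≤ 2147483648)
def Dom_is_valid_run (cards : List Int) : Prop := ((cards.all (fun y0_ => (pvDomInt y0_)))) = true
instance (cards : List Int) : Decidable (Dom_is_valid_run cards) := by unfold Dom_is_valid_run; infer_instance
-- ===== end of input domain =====

-- B replaces A's sort + set-dedup + span/gap arithmetic (with an ace-high remap retry) by in-loop duplicate detection and a brute-force scan of the 16 candidate rank windows; same return value on Pre_.


-- ===== PORT A =====
def JOKER_INT : Int := 64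

-- _can_form_run; the indexings sorted_ranks[-1] / sorted_ranks[0] are only reached on a
-- nonempty list, so the total pyGetD form is exact there.
def canFormRun (sortedRanks : List Int) (jokers : Int) : Bool :=
  if sortedRanks.isEmpty then decide (jokers ≥ 4)
  else
    let span := PySem.List.pyGetD sortedRanks (-1) 0 - PySem.List.pyGetD sortedRanks 0 0 + 1
    let gaps := span - PySem.List.len sortedRanks
    decide (gaps ≤ jokers) && decide (PySem.List.len sortedRanks + jokers ≥ 4)

-- A's for-loop over cards; `none` = the early `return False` on a suit mismatch.
def runLoopA : List Int → Int → List Int → Int → Option (Int × List Int × Int)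
  | [], suit, ranks, jokerCount => some (suit, ranks, jokerCount)
  | c :: rest, suit, ranks, jokerCount =>
    if c ≥ JOKER_INT then runLoopA rest suit ranks (jokerCount + 1)
    else
      let s := c >>> (4 : Nat)
      let r := PySem.Int.band c 15
      if suit = -1 then runLoopA rest s (ranks ++ [r]) jokerCount
      else if s ≠ suit then none
      else runLoopA rest suit (ranks ++ [r]) jokerCount

def is_valid_run (cards : List Int) : Bool :=
  let n := PySem.List.len cards
  if n < 4 then false
  else
    match runLoopA cards (-1) [] 0 with
    | none => false
    | some (_, ranks, jokerCount) =>
      if ranks.isEmpty then true           -- all-joker run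
      else
        let ranksS := PySem.List.sorted ranks (fun x => x) false
        if PySem.Set.len (PySem.Set.ofList ranksS) ≠ PySem.List.len ranksS then false
        else if canFormRun ranksS jokerCount then true
        else if ranksS.contains 1 then     -- try ace-high
          canFormRun (PySem.List.sorted (ranksS.map (fun r => if r = 1 then 14 else r)) (fun x => x) false) jokerCount
        else false

-- ===== PORT B =====
-- B's classifying for-loop: suit check, then in-loop duplicate detection on the seen-ranks
-- list; `none` = the early `return False` (suit mismatch or duplicate rank).
def runLoopB : List Int → Option Int → List Int → Int → Option (List Int × Int)
  | [], _, seen, jokers => some (seen, jokers)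
  | c :: rest, suit?, seen, jokers =>
    if c ≥ (64 : Int) then runLoopB rest suit? seen (jokers + 1)
    else
      let s := c >>> (4 : Nat)
      match suit? with
      | none =>
        let r := PySem.Int.band c 15
        if seen.contains r then none else runLoopB rest (some s) (seen ++ [r]) jokers
      | some σ =>
        if s ≠ σ then none
        else
          let r := PySem.Int.band c 15
          if seen.contains r then none else runLoopB rest (some σ) (seen ++ [r]) jokers

def is_valid_run_alt (cards : List Int) : Bool :=
  if PySem.List.len cards < 4 then false
  else
    match runLoopB cards none [] 0 with
    | none => false
    | some (seen, jokers) =>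
      if seen.isEmpty then true
      else
        let total := PySem.List.len seen + jokers
        if total < 4 then false
        else
          -- for lo in range(16): if all(...): return True
          (PySem.List.pyRange 0 16 1).any (fun lo =>
            let hi := lo + total - 1
            seen.all (fun r =>
              (decide (lo ≤ r) && decide (r ≤ hi)) ||
              (decide (r = 1) && decide (lo ≤ (14 : Int)) && decide ((14 : Int) ≤ hi))))

-- ===== PRECONDITION & SPEC =====
-- Pre_ excludes lists containing a card between -16 and -1: malformed encodings whose suit
-- nibble (c >> 4) equals A's -1 suit sentinel, so A's suit-consistency check is accidentally
-- bypassed for them; B naturally treats them as carrying an ordinary suit there.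
def Pre_is_valid_run (cards : List Int) : Prop := ∀ c ∈ cards, ¬ (-16 ≤ c ∧ c ≤ -1)
instance (cards : List Int) : Decidable (Pre_is_valid_run cards) := by unfold Pre_is_valid_run; infer_instance
def pvWitness_is_valid_run : List Int := [1, 2, 3, 4]

def Spec_is_valid_run (cards : List Int) (out : Bool) : Prop := out = is_valid_run_alt cards
instance (cards : List Int) (out : Bool) : Decidable (Spec_is_valid_run cards out) := by unfold Spec_is_valid_run; infer_instance

-- ===== CLAIM (what is proved, stated in full; the proofs are below) =====
def Claim_equal_is_valid_run : Prop := ∀ (cards : List Int), Dom_is_valid_run cards → Pre_is_valid_run cards → Spec_is_valid_run cards (is_valid_run cards)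

-- ===== LEMMAS AND PROOFS =====

-- the naturals (non-joker cards), their suits and ranks, and the joker count of a card list
def nat64 (l : List Int) : List Int := l.filter (fun c => decide (c < 64))
def suitsOf (l : List Int) : List Int := (nat64 l).map (fun (c : Int) => c >>> (4 : Nat))
def ranksOf (l : List Int) : List Int := (nat64 l).map (fun c => PySem.Int.band c 15)
def cnt64 (l : List Int) : Int := (l.countP (fun c => decide (64 ≤ c)) : Int)

theorem nat64_cons_joker (c : Int) (l : List Int) (h : (64:Int) ≤ c) : nat64 (c :: l) = nat64 l := by
  simp [nat64, List.filter_cons]; omega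

theorem nat64_cons_nat (c : Int) (l : List Int) (h : c < 64) : nat64 (c :: l) = c :: nat64 l := by
  simp [nat64, h]

theorem cnt64_cons_joker (c : Int) (l : List Int) (h : (64:Int) ≤ c) : cnt64 (c :: l) = cnt64 l + 1 := by
  simp [cnt64, h]

theorem cnt64_cons_nat (c : Int) (l : List Int) (h : c < 64) : cnt64 (c :: l) = cnt64 l := by
  simp [cnt64, List.countP_cons]; omega

theorem shift4_eq_neg_one_iff (c : Int) : c >>> (4 : Nat) = -1 ↔ (-16 ≤ c ∧ c ≤ -1) := by
  rw [Int.shiftRight_eq_div_pow]; norm_num; omega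

-- characterisation of A's loop once a real suit has been fixed
theorem runA_const : ∀ (l : List Int) (suit : Int), suit ≠ -1 → ∀ (ranks : List Int) (jk : Int),
    runLoopA l suit ranks jk =
      if (suitsOf l).all (fun s => s == suit) then some (suit, ranks ++ ranksOf l, jk + cnt64 l) else none
  | [], suit, _, ranks, jk => by simp [runLoopA, suitsOf, ranksOf, nat64, cnt64]
  | c :: rest, suit, hs, ranks, jk => by
    by_cases h : (64:Int) ≤ c
    · have h1 : runLoopA (c :: rest) suit ranks jk = runLoopA rest suit ranks (jk + 1) := by
        simp [runLoopA, JOKER_INT, h]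
      rw [h1, runA_const rest suit hs ranks (jk + 1)]
      have h2 : suitsOf (c :: rest) = suitsOf rest := by simp [suitsOf, nat64_cons_joker c rest h]
      have h3 : ranksOf (c :: rest) = ranksOf rest := by simp [ranksOf, nat64_cons_joker c rest h]
      rw [h2, h3, cnt64_cons_joker c rest h]
      split <;> simp <;> (try omega)
    · have hlt : c < 64 := by omega
      have h1 : runLoopA (c :: rest) suit ranks jk =
          if c >>> (4:Nat) = suit then runLoopA rest suit (ranks ++ [PySem.Int.band c 15]) jk else none := by
        simp [runLoopA, JOKER_INT, h, hs]
      rw [h1]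
      have h2 : suitsOf (c :: rest) = c >>> (4:Nat) :: suitsOf rest := by
        simp [suitsOf, nat64_cons_nat c rest hlt]
      have h3 : ranksOf (c :: rest) = PySem.Int.band c 15 :: ranksOf rest := by
        simp [ranksOf, nat64_cons_nat c rest hlt]
      rw [h2, h3, cnt64_cons_nat c rest hlt]
      by_cases hsu : c >>> (4:Nat) = suit
      · rw [if_pos hsu, runA_const rest suit hs (ranks ++ [PySem.Int.band c 15]) jk]
        simp [hsu]
      · simp [hsu]

-- characterisation of A's whole loop from the -1 sentinel, under Pre_
theorem runA_init : ∀ (l : List Int), (∀ c ∈ l, ¬ (-16 ≤ c ∧ c ≤ -1)) → ∀ (ranks : List Int) (jk : Int),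
    runLoopA l (-1) ranks jk =
      match suitsOf l with
      | [] => some (-1, ranks, jk + cnt64 l)
      | s0 :: ss => if ss.all (fun s => s == s0) then some (s0, ranks ++ ranksOf l, jk + cnt64 l) else none
  | [], _, ranks, jk => by simp [runLoopA, suitsOf, nat64, cnt64]
  | c :: rest, hpre, ranks, jk => by
    have hpre' : ∀ c' ∈ rest, ¬ (-16 ≤ c' ∧ c' ≤ -1) := fun c' hc' => hpre c' (by simp [hc'])
    by_cases h : (64:Int) ≤ c
    · have h1 : runLoopA (c :: rest) (-1) ranks jk = runLoopA rest (-1) ranks (jk + 1) := by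
        simp [runLoopA, JOKER_INT, h]
      rw [h1, runA_init rest hpre' ranks (jk + 1)]
      have h2 : suitsOf (c :: rest) = suitsOf rest := by simp [suitsOf, nat64_cons_joker c rest h]
      have h3 : ranksOf (c :: rest) = ranksOf rest := by simp [ranksOf, nat64_cons_joker c rest h]
      have harith : jk + 1 + cnt64 rest = jk + (cnt64 rest + 1) := by ring
      rw [h2, h3, cnt64_cons_joker c rest h, harith]
    · have hlt : c < 64 := by omega
      have hsne : c >>> (4:Nat) ≠ -1 := by
        rw [ne_eq, shift4_eq_neg_one_iff]; exact hpre c (by simp)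
      have h1 : runLoopA (c :: rest) (-1) ranks jk =
          runLoopA rest (c >>> (4:Nat)) (ranks ++ [PySem.Int.band c 15]) jk := by
        simp [runLoopA, JOKER_INT, h]
      rw [h1, runA_const rest (c >>> (4:Nat)) hsne (ranks ++ [PySem.Int.band c 15]) jk]
      have h2 : suitsOf (c :: rest) = c >>> (4:Nat) :: suitsOf rest := by
        simp [suitsOf, nat64_cons_nat c rest hlt]
      have h3 : ranksOf (c :: rest) = PySem.Int.band c 15 :: ranksOf rest := by
        simp [ranksOf, nat64_cons_nat c rest hlt]
      rw [h2, h3, cnt64_cons_nat c rest hlt]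
      split <;> simp_all <;> (try assumption)

theorem runB_some : ∀ (l : List Int) (σ : Int) (seen : List Int) (jk : Int), seen.Nodup →
    runLoopB l (some σ) seen jk =
      if (∀ s ∈ suitsOf l, s = σ) ∧ (seen ++ ranksOf l).Nodup
      then some (seen ++ ranksOf l, jk + cnt64 l) else none
  | [], σ, seen, jk, hnd => by
    simp [runLoopB, suitsOf, ranksOf, nat64, cnt64, hnd]
  | c :: rest, σ, seen, jk, hnd => by
    by_cases h : (64:Int) ≤ c
    · have h1 : runLoopB (c :: rest) (some σ) seen jk = runLoopB rest (some σ) seen (jk + 1) := by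
        simp [runLoopB, h]
      rw [h1, runB_some rest σ seen (jk + 1) hnd]
      rw [show suitsOf (c :: rest) = suitsOf rest by simp [suitsOf, nat64_cons_joker c rest h],
          show ranksOf (c :: rest) = ranksOf rest by simp [ranksOf, nat64_cons_joker c rest h],
          cnt64_cons_joker c rest h]
      split
      · simp; omega
      · rfl
    · have hlt : c < 64 := by omega
      rw [show suitsOf (c :: rest) = c >>> (4:Nat) :: suitsOf rest by simp [suitsOf, nat64_cons_nat c rest hlt],
          show ranksOf (c :: rest) = PySem.Int.band c 15 :: ranksOf rest by simp [ranksOf, nat64_cons_nat c rest hlt],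
          cnt64_cons_nat c rest hlt]
      by_cases hsu : c >>> (4:Nat) = σ
      · by_cases hmem : PySem.Int.band c 15 ∈ seen
        · have h1 : runLoopB (c :: rest) (some σ) seen jk = none := by
            simp [runLoopB, h, hsu, hmem]
          rw [h1]
          have : ¬ (seen ++ PySem.Int.band c 15 :: ranksOf rest).Nodup := by
            rw [List.nodup_append]
            rintro ⟨-, -, hd⟩
            exact hd _ hmem _ (by simp) rfl
          rw [if_neg (by tauto)]
        · have h1 : runLoopB (c :: rest) (some σ) seen jk
              = runLoopB rest (some σ) (seen ++ [PySem.Int.band c 15]) jk := by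
            simp [runLoopB, h, hsu, hmem]
          have hnd' : (seen ++ [PySem.Int.band c 15]).Nodup := by
            rw [List.nodup_append]
            exact ⟨hnd, List.nodup_singleton _, by intro a ha b hb; simp at hb; subst hb; exact fun he => hmem (he ▸ ha)⟩
          rw [h1, runB_some rest σ (seen ++ [PySem.Int.band c 15]) jk hnd']
          rw [show (seen ++ [PySem.Int.band c 15]) ++ ranksOf rest
              = seen ++ PySem.Int.band c 15 :: ranksOf rest by simp]
          have hcond : (∀ s ∈ suitsOf rest, s = σ)
              ↔ (∀ s ∈ c >>> (4:Nat) :: suitsOf rest, s = σ) := by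
            simp [hsu]
          split_ifs with h2 h3 h3 <;> first | rfl | (exfalso; tauto)
      · have h1 : runLoopB (c :: rest) (some σ) seen jk = none := by
          simp [runLoopB, h, hsu]
        rw [h1, if_neg (by rintro ⟨hs, -⟩; exact hsu (hs _ (by simp)))]

theorem runB_init : ∀ (l : List Int) (jk : Int),
    runLoopB l none [] jk =
      match suitsOf l with
      | [] => some ([], jk + cnt64 l)
      | s0 :: ss => if (∀ s ∈ ss, s = s0) ∧ (ranksOf l).Nodup
                    then some (ranksOf l, jk + cnt64 l) else none
  | [], jk => by simp [runLoopB, suitsOf, nat64, cnt64]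
  | c :: rest, jk => by
    by_cases h : (64:Int) ≤ c
    · have h1 : runLoopB (c :: rest) none [] jk = runLoopB rest none [] (jk + 1) := by
        simp [runLoopB, h]
      rw [h1, runB_init rest (jk + 1),
          show suitsOf (c :: rest) = suitsOf rest by simp [suitsOf, nat64_cons_joker c rest h],
          show ranksOf (c :: rest) = ranksOf rest by simp [ranksOf, nat64_cons_joker c rest h],
          cnt64_cons_joker c rest h]
      have : jk + 1 + cnt64 rest = jk + (cnt64 rest + 1) := by ring
      rw [this]
    · have hlt : c < 64 := by omega
      have h1 : runLoopB (c :: rest) none [] jk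
          = runLoopB rest (some (c >>> (4:Nat))) [PySem.Int.band c 15] jk := by
        simp [runLoopB, h]
      rw [h1, runB_some rest (c >>> (4:Nat)) [PySem.Int.band c 15] jk (List.nodup_singleton _),
          show suitsOf (c :: rest) = c >>> (4:Nat) :: suitsOf rest by simp [suitsOf, nat64_cons_nat c rest hlt],
          show ranksOf (c :: rest) = PySem.Int.band c 15 :: ranksOf rest by simp [ranksOf, nat64_cons_nat c rest hlt],
          cnt64_cons_nat c rest hlt]
      rfl

theorem band15_bounds (c : Int) : 0 ≤ PySem.Int.band c 15 ∧ PySem.Int.band c 15 ≤ 15 := by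
  unfold PySem.Int.band
  by_cases h : 0 ≤ c
  · rw [if_pos h, if_pos (by norm_num : (0:Int) ≤ 15)]
    have h1 : c.toNat &&& (15:Int).toNat ≤ (15:Int).toNat := Nat.and_le_right
    exact ⟨Int.natCast_nonneg _, by omega⟩
  · rw [if_neg h, if_pos (by norm_num : (0:Int) ≤ 15)]
    have h1 : (15:Int).toNat - ((15:Int).toNat &&& (-c - 1).toNat) ≤ 15 := by omega
    exact ⟨Int.natCast_nonneg _, by omega⟩

-- set(xs) has the length of xs exactly when xs has no duplicates
theorem nodup_append_singleton {α : Type} (ys : List α) (x : α) :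
    (ys ++ [x]).Nodup ↔ x ∉ ys ∧ ys.Nodup := by
  rw [List.Perm.nodup_iff (List.perm_append_singleton x ys), List.nodup_cons]

theorem ofList_len_eq_iff {α : Type} [BEq α] [LawfulBEq α] (xs : List α) :
    (PySem.Set.ofList xs).length = xs.length ↔ xs.Nodup := by
  induction xs using List.reverseRecOn with
  | nil => simp [PySem.Set.ofList_nil]
  | append_singleton ys x ih =>
    rw [PySem.Set.ofList_append_singleton, PySem.Set.add_eq_ite, nodup_append_singleton]
    by_cases hx : x ∈ PySem.Set.ofList ys
    · have hxy : x ∈ ys := (PySem.Set.mem_ofList ys x).mp hx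
      rw [if_pos hx]
      have hle := PySem.Set.length_ofList_le (xs := ys)
      simp only [List.length_append, List.length_singleton]
      constructor
      · omega
      · rintro ⟨hni, -⟩; exact absurd hxy hni
    · have hxy : x ∉ ys := fun h => hx ((PySem.Set.mem_ofList ys x).mpr h)
      rw [if_neg hx]
      simp only [List.length_append, List.length_singleton]
      constructor
      · intro hlen; exact ⟨hxy, ih.mp (by omega)⟩
      · rintro ⟨-, hnd⟩; rw [ih.mpr hnd]


theorem pw_le_getLast : ∀ (l : List Int), l.Pairwise (· ≤ ·) → ∀ (h : l ≠ []) (x : Int), x ∈ l → x ≤ l.getLast h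
  | [a], _, _, x, hx => by simp at hx; simp [hx]
  | a :: b :: t, hp, h, x, hx => by
    rw [List.getLast_cons (by simp)]
    rcases List.mem_cons.mp hx with rfl | hx'
    · calc x ≤ b := (List.pairwise_cons.mp hp).1 b (by simp)
        _ ≤ (b :: t).getLast (by simp) := pw_le_getLast _ (List.pairwise_cons.mp hp).2 _ _ (by simp)
    · exact pw_le_getLast _ (List.pairwise_cons.mp hp).2 _ _ hx'
theorem canFormRun_sorted_iff (M : List Int) (hM : M ≠ []) (jk : Int) :
    canFormRun (PySem.List.sorted M (fun x => x) false) jk = true ↔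
    ∃ a b : Int, a ∈ M ∧ b ∈ M ∧ (∀ r ∈ M, a ≤ r ∧ r ≤ b) ∧
      b - a + 1 ≤ (M.length : Int) + jk ∧ 4 ≤ (M.length : Int) + jk := by
  have hSne : PySem.List.sorted M (fun x => x) false ≠ [] := by
    rw [ne_eq, PySem.List.sorted_eq_nil_iff]; exact hM
  cases hS : PySem.List.sorted M (fun x => x) false with
  | nil => exact absurd hS hSne
  | cons m t =>
    rw [← hS]
    have hlenS : (PySem.List.sorted M (fun x => x) false).length = M.length :=
      PySem.List.length_sorted M _ _
    have hhead : PySem.List.pyGetD (PySem.List.sorted M (fun x => x) false) 0 0 = m := by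
      rw [hS, PySem.List.pyGetD_zero_cons]
    have hlast : PySem.List.pyGetD (PySem.List.sorted M (fun x => x) false) (-1) 0
        = (PySem.List.sorted M (fun x => x) false).getLast hSne := by
      exact PySem.List.pyGetD_neg_one _ _ hSne
    have hmmem : m ∈ M := (PySem.List.mem_sorted M _ false m).mp (by rw [hS]; simp)
    have hlmem : (PySem.List.sorted M (fun x => x) false).getLast hSne ∈ M :=
      (PySem.List.mem_sorted M _ false _).mp (List.getLast_mem hSne)
    have hmin : ∀ r ∈ M, m ≤ r := PySem.List.key_head_sorted_le M (fun x => x) hS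
    have hmax : ∀ r ∈ M, r ≤ (PySem.List.sorted M (fun x => x) false).getLast hSne := by
      intro r hr
      exact pw_le_getLast _ (PySem.List.sorted_pairwise M (fun x => x)) hSne r
        ((PySem.List.mem_sorted M _ false r).mpr hr)
    unfold canFormRun
    rw [if_neg (by simp [List.isEmpty_iff, hSne])]
    rw [hhead, hlast]
    simp only [Bool.and_eq_true, decide_eq_true_eq, PySem.List.len_eq, hlenS]
    constructor
    · rintro ⟨h1, h2⟩
      exact ⟨m, _, hmmem, hlmem, fun r hr => ⟨hmin r hr, hmax r hr⟩, by omega, by omega⟩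
    · rintro ⟨a, b, ha, hb, hab, h1, h2⟩
      have h3 := (hab m hmmem).1
      have h4 := hmax b hb
      have h5 := hmin a ha
      have h6 := (hab _ hlmem).2
      constructor <;> omega

theorem exists_extremal (M : List Int) (hM : M ≠ []) :
    ∃ a b : Int, a ∈ M ∧ b ∈ M ∧ ∀ r ∈ M, a ≤ r ∧ r ≤ b := by
  have hSne : PySem.List.sorted M (fun x => x) false ≠ [] := by
    rw [ne_eq, PySem.List.sorted_eq_nil_iff]; exact hM
  cases hS : PySem.List.sorted M (fun x => x) false with
  | nil => exact absurd hS hSne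
  | cons m t =>
    refine ⟨m, (PySem.List.sorted M (fun x => x) false).getLast hSne,
      (PySem.List.mem_sorted M _ false m).mp (by rw [hS]; simp),
      (PySem.List.mem_sorted M _ false _).mp (List.getLast_mem hSne), fun r hr => ?_⟩
    exact ⟨PySem.List.key_head_sorted_le M (fun x => x) hS r hr,
      pw_le_getLast _ (PySem.List.sorted_pairwise M (fun x => x)) hSne r
        ((PySem.List.mem_sorted M _ false r).mpr hr)⟩

theorem window_eq (R : List Int) (jk : Int) (hne : R ≠ [])
    (hb : ∀ r ∈ R, 0 ≤ r ∧ r ≤ 15) (h4 : 4 ≤ (R.length : Int) + jk) :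
    ((PySem.List.pyRange 0 16 1).any (fun lo =>
        R.all (fun r =>
          (decide (lo ≤ r) && decide (r ≤ lo + ((R.length : Int) + jk) - 1)) ||
          (decide (r = 1) && decide (lo ≤ (14:Int)) && decide ((14:Int) ≤ lo + ((R.length : Int) + jk) - 1)))) = true)
    ↔ (canFormRun (PySem.List.sorted R (fun x => x) false) jk = true ∨
       ((1:Int) ∈ R ∧ canFormRun (PySem.List.sorted
          ((PySem.List.sorted R (fun x => x) false).map (fun r => if r = 1 then 14 else r))
          (fun x => x) false) jk = true)) := by
  set T : Int := (R.length : Int) + jk with hT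
  set MH : List Int := (PySem.List.sorted R (fun x => x) false).map (fun r => if r = 1 then 14 else r) with hMH
  have hMHne : MH ≠ [] := by
    rw [hMH, ne_eq, List.map_eq_nil_iff, PySem.List.sorted_eq_nil_iff]; exact hne
  have hMHlen : (MH.length : Int) = (R.length : Int) := by
    simp [hMH, PySem.List.length_sorted]
  have hmemMH : ∀ x, x ∈ MH ↔ ∃ r ∈ R, (if r = 1 then (14:Int) else r) = x := by
    intro x
    simp [hMH, List.mem_map, PySem.List.mem_sorted]
  have hLHS : ((PySem.List.pyRange 0 16 1).any (fun lo =>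
        R.all (fun r =>
          (decide (lo ≤ r) && decide (r ≤ lo + T - 1)) ||
          (decide (r = 1) && decide (lo ≤ (14:Int)) && decide ((14:Int) ≤ lo + T - 1)))) = true)
      ↔ ∃ lo : Int, (0 ≤ lo ∧ lo < 16) ∧ ∀ r ∈ R,
          (lo ≤ r ∧ r ≤ lo + T - 1) ∨ (r = 1 ∧ lo ≤ 14 ∧ 14 ≤ lo + T - 1) := by
    rw [List.any_eq_true]
    constructor
    · rintro ⟨lo, hlo, hall⟩
      refine ⟨lo, by simpa using (PySem.List.mem_pyRange_one).mp hlo, ?_⟩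
      intro r hr
      have := List.all_eq_true.mp hall r hr
      simp only [Bool.or_eq_true, Bool.and_eq_true, decide_eq_true_eq] at this
      tauto
    · rintro ⟨lo, hlo, hall⟩
      refine ⟨lo, (PySem.List.mem_pyRange_one).mpr (by omega), ?_⟩
      rw [List.all_eq_true]
      intro r hr
      have := hall r hr
      simp only [Bool.or_eq_true, Bool.and_eq_true, decide_eq_true_eq]
      tauto
  rw [hLHS, canFormRun_sorted_iff R hne jk, canFormRun_sorted_iff MH hMHne jk, hMHlen]
  constructor
  · rintro ⟨lo, ⟨hlo0, hlo16⟩, hall⟩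
    by_cases hlow : ∀ r ∈ R, lo ≤ r ∧ r ≤ lo + T - 1
    · left
      obtain ⟨a, b, ha, hb, hab⟩ := exists_extremal R hne
      exact ⟨a, b, ha, hb, hab, by
        have h1 := (hlow a ha).1
        have h2 := (hlow b hb).2
        omega, h4⟩
    · push_neg at hlow
      obtain ⟨r0, hr0, hr0n⟩ := hlow
      have hcl := hall r0 hr0
      have hr01 : r0 = 1 ∧ lo ≤ 14 ∧ 14 ≤ lo + T - 1 := by
        rcases hcl with ⟨hl, hr⟩ | hgood
        · exact absurd (hr0n hl) (by omega)
        · exact hgood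
      right
      refine ⟨hr01.1 ▸ hr0, ?_⟩
      obtain ⟨a, b, ha, hb, hab⟩ := exists_extremal MH hMHne
      have hwin : ∀ x ∈ MH, lo ≤ x ∧ x ≤ lo + T - 1 := by
        intro x hx
        obtain ⟨r, hr, hfr⟩ := (hmemMH x).mp hx
        by_cases h1 : r = 1
        · subst h1; simp at hfr; omega
        · rw [if_neg h1] at hfr
          subst hfr
          have := hall r hr
          tauto
      refine ⟨a, b, ha, hb, hab, by
        have h1 := (hwin a ha).1
        have h2 := (hwin b hb).2
        omega, h4⟩
  · rintro (⟨a, b, ha', hb', hab, h1, h2⟩ | ⟨h1R, a, b, ha', hb', hab, h1, h2⟩)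
    · refine ⟨a, ⟨(hb a ha').1, by have := (hb a ha').2; omega⟩, ?_⟩
      intro r hr
      left
      exact ⟨(hab r hr).1, by have := (hab r hr).2; omega⟩
    · have h14 : (14:Int) ∈ MH := (hmemMH 14).mpr ⟨1, h1R, by simp⟩
      have haR : 0 ≤ a ∧ a ≤ 15 := by
        obtain ⟨r, hr, hfr⟩ := (hmemMH a).mp ha'
        by_cases hr1 : r = 1
        · subst hr1; simp at hfr; omega
        · rw [if_neg hr1] at hfr; subst hfr; exact hb r hr
      refine ⟨a, ⟨haR.1, by omega⟩, ?_⟩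
      intro r hr
      by_cases hr1 : r = 1
      · right
        refine ⟨hr1, ?_, ?_⟩
        · exact le_trans ((hab 14 h14).1) le_rfl
        · have := (hab 14 h14).2; omega
      · left
        have hrMH : r ∈ MH := (hmemMH r).mpr ⟨r, hr, by rw [if_neg hr1]⟩
        exact ⟨(hab r hrMH).1, by have := (hab r hrMH).2; omega⟩


-- ===== VERDICT (by name: the statement is the Claim_ definition above) =====
theorem is_valid_run_spec : Claim_equal_is_valid_run := by
  intro cards _ hpre
  unfold Spec_is_valid_run
  simp only [is_valid_run, is_valid_run_alt]
  by_cases hlen : PySem.List.len cards < 4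
  · simp only [if_pos hlen]
  · simp only [if_neg hlen]
    cases hσ : suitsOf cards with
    | nil =>
      have hn : nat64 cards = [] := by
        have h0 := hσ; simp only [suitsOf] at h0; exact List.map_eq_nil_iff.mp h0
      have hr : ranksOf cards = [] := by simp [ranksOf, hn]
      have hA : runLoopA cards (-1) [] 0 = some (-1, [], 0 + cnt64 cards) := by
        rw [runA_init cards hpre, hσ]
      have hB : runLoopB cards none [] 0 = some ([], 0 + cnt64 cards) := by
        rw [runB_init cards 0, hσ]
      rw [hA, hB]
      simp
    | cons s0 ss =>
      have hnatne : nat64 cards ≠ [] := by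
        intro h0
        have h1 : suitsOf cards = [] := by simp [suitsOf, h0]
        rw [hσ] at h1; exact List.cons_ne_nil s0 ss h1
      have hrne : ranksOf cards ≠ [] := by
        simp only [ranksOf]; exact fun h0 => hnatne (List.map_eq_nil_iff.mp h0)
      by_cases hall : ∀ s ∈ ss, s = s0
      · have hallb : ss.all (fun s => s == s0) = true := by simpa using hall
        have hA : runLoopA cards (-1) [] 0 = some (s0, ranksOf cards, cnt64 cards) := by
          rw [runA_init cards hpre, hσ]; simp [hallb]
        have hSlen : (PySem.List.sorted (ranksOf cards) (fun x => x) false).length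
            = (ranksOf cards).length := PySem.List.length_sorted _ _ _
        have hεf : (ranksOf cards).isEmpty = false := by
          simpa [List.isEmpty_iff] using hrne
        by_cases hnd : (ranksOf cards).Nodup
        · have hB : runLoopB cards none [] 0 = some (ranksOf cards, cnt64 cards) := by
            rw [runB_init cards 0, hσ]
            show (if (∀ s ∈ ss, s = s0) ∧ (ranksOf cards).Nodup
                  then some (ranksOf cards, 0 + cnt64 cards) else none)
                = some (ranksOf cards, cnt64 cards)
            rw [if_pos ⟨hall, hnd⟩, zero_add]
          rw [hA, hB]
          show (if (ranksOf cards).isEmpty then true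
                else if PySem.Set.len (PySem.Set.ofList (PySem.List.sorted (ranksOf cards) (fun x => x) false))
                    ≠ PySem.List.len (PySem.List.sorted (ranksOf cards) (fun x => x) false) then false
                else if canFormRun (PySem.List.sorted (ranksOf cards) (fun x => x) false) (cnt64 cards) then true
                else if (PySem.List.sorted (ranksOf cards) (fun x => x) false).contains 1 then
                  canFormRun (PySem.List.sorted ((PySem.List.sorted (ranksOf cards) (fun x => x) false).map
                    (fun r => if r = 1 then 14 else r)) (fun x => x) false) (cnt64 cards)
                else false)
              = (if (ranksOf cards).isEmpty then true
                 else if PySem.List.len (ranksOf cards) + cnt64 cards < 4 then false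
                 else (PySem.List.pyRange 0 16 1).any (fun lo =>
                   (ranksOf cards).all (fun r =>
                     (decide (lo ≤ r) && decide (r ≤ lo + (PySem.List.len (ranksOf cards) + cnt64 cards) - 1)) ||
                     (decide (r = 1) && decide (lo ≤ (14:Int))
                       && decide ((14:Int) ≤ lo + (PySem.List.len (ranksOf cards) + cnt64 cards) - 1)))))
          have hSnodup : (PySem.List.sorted (ranksOf cards) (fun x => x) false).Nodup :=
            (List.Perm.nodup_iff (PySem.List.sorted_perm (ranksOf cards) (fun x => x) false)).mpr hnd
          have hdup : ¬ (PySem.Set.len (PySem.Set.ofList (PySem.List.sorted (ranksOf cards) (fun x => x) false))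
              ≠ PySem.List.len (PySem.List.sorted (ranksOf cards) (fun x => x) false)) := by
            have h1 := (ofList_len_eq_iff (PySem.List.sorted (ranksOf cards) (fun x => x) false)).mpr hSnodup
            simp [PySem.Set.len, PySem.List.len_eq, h1]
          have hSne : PySem.List.sorted (ranksOf cards) (fun x => x) false ≠ [] := by
            rw [ne_eq, PySem.List.sorted_eq_nil_iff]; exact hrne
          have hHne : (PySem.List.sorted ((PySem.List.sorted (ranksOf cards) (fun x => x) false).map
              (fun r => if r = 1 then 14 else r)) (fun x => x) false) ≠ [] := by
            rw [ne_eq, PySem.List.sorted_eq_nil_iff, List.map_eq_nil_iff]; exact hSne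
          simp only [hεf, Bool.false_eq_true, if_false, if_neg hdup]
          by_cases h4 : PySem.List.len (ranksOf cards) + cnt64 cards < 4
          · -- total < 4: B rejects up front, both canFormRun tests fail their 4-card gate
            have hc1 : canFormRun (PySem.List.sorted (ranksOf cards) (fun x => x) false) (cnt64 cards) = false := by
              unfold canFormRun
              rw [if_neg (by simp [List.isEmpty_iff, hSne])]
              simp only [PySem.List.len_eq, hSlen, Bool.and_eq_false_iff, decide_eq_false_iff_not]
              right
              simp only [PySem.List.len_eq] at h4
              omega
            have hc2 : canFormRun (PySem.List.sorted ((PySem.List.sorted (ranksOf cards) (fun x => x) false).map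
                (fun r => if r = 1 then 14 else r)) (fun x => x) false) (cnt64 cards) = false := by
              unfold canFormRun
              rw [if_neg (by simp [List.isEmpty_iff, hHne])]
              simp only [PySem.List.len_eq, PySem.List.length_sorted, List.length_map, hSlen,
                Bool.and_eq_false_iff, decide_eq_false_iff_not]
              right
              simp only [PySem.List.len_eq] at h4
              omega
            rw [if_pos h4, hc1]
            cases hct : (PySem.List.sorted (ranksOf cards) (fun x => x) false).contains 1 <;>
              simp [hc2]
          · -- total ≥ 4: the window scan matches A's two span tests
            have h4' : 4 ≤ ((ranksOf cards).length : Int) + cnt64 cards := by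
              simp only [PySem.List.len_eq] at h4; omega
            have hbounds : ∀ r ∈ ranksOf cards, 0 ≤ r ∧ r ≤ 15 := by
              intro r hr
              simp only [ranksOf, List.mem_map] at hr
              obtain ⟨c, -, rfl⟩ := hr
              exact band15_bounds c
            have hw := window_eq (ranksOf cards) (cnt64 cards) hrne hbounds h4'
            simp only [← PySem.List.len_eq] at hw
            have hmem1 : (PySem.List.sorted (ranksOf cards) (fun x => x) false).contains 1 = true
                ↔ (1:Int) ∈ ranksOf cards := by
              simp [PySem.List.mem_sorted]
            rw [if_neg h4, Bool.eq_iff_iff]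
            refine Iff.trans ?_ hw.symm
            split_ifs with hc hct
            · exact ⟨fun _ => Or.inl hc, fun _ => rfl⟩
            · constructor
              · intro h; exact Or.inr ⟨hmem1.mp hct, h⟩
              · rintro (h | ⟨-, h⟩)
                · exact absurd h hc
                · exact h
            · constructor
              · intro h; exact absurd h (by simp)
              · rintro (h | ⟨hm, -⟩)
                · exact absurd h hc
                · exact absurd (hmem1.mpr hm) hct
        · have hB : runLoopB cards none [] 0 = none := by
            rw [runB_init cards 0, hσ]
            show (if (∀ s ∈ ss, s = s0) ∧ (ranksOf cards).Nodup
                  then some (ranksOf cards, 0 + cnt64 cards) else none) = none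
            rw [if_neg (fun h => hnd h.2)]
          rw [hA, hB]
          have hSnd : ¬ (PySem.List.sorted (ranksOf cards) (fun x => x) false).Nodup :=
            fun h => hnd ((List.Perm.nodup_iff (PySem.List.sorted_perm (ranksOf cards) (fun x => x) false)).mp h)
          have hdup : PySem.Set.len (PySem.Set.ofList (PySem.List.sorted (ranksOf cards) (fun x => x) false))
              ≠ PySem.List.len (PySem.List.sorted (ranksOf cards) (fun x => x) false) := by
            have hne' : (PySem.Set.ofList (PySem.List.sorted (ranksOf cards) (fun x => x) false)).length
                ≠ (PySem.List.sorted (ranksOf cards) (fun x => x) false).length :=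
              fun h => hSnd ((ofList_len_eq_iff _).mp h)
            simp only [PySem.Set.len, PySem.List.len_eq]
            exact_mod_cast fun h => hne' (by exact_mod_cast h)
          show (if (ranksOf cards).isEmpty then true
                else if PySem.Set.len (PySem.Set.ofList (PySem.List.sorted (ranksOf cards) (fun x => x) false))
                    ≠ PySem.List.len (PySem.List.sorted (ranksOf cards) (fun x => x) false) then false
                else if canFormRun (PySem.List.sorted (ranksOf cards) (fun x => x) false) (cnt64 cards) then true
                else if (PySem.List.sorted (ranksOf cards) (fun x => x) false).contains 1 then
                  canFormRun (PySem.List.sorted ((PySem.List.sorted (ranksOf cards) (fun x => x) false).map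
                    (fun r => if r = 1 then 14 else r)) (fun x => x) false) (cnt64 cards)
                else false)
              = false
          rw [if_neg (by simp [hεf]), if_pos hdup]
      · obtain ⟨x, hxmem, hxne⟩ : ∃ x ∈ ss, x ≠ s0 := by
          by_contra hc
          exact hall (by simpa using hc)
        have hallb : ss.all (fun s => s == s0) = false :=
          List.all_eq_false.mpr ⟨x, hxmem, by simpa using hxne⟩
        have hA : runLoopA cards (-1) [] 0 = none := by
          rw [runA_init cards hpre, hσ]; simp [hallb]
        have hB : runLoopB cards none [] 0 = none := by
          rw [runB_init cards 0, hσ]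
          show (if (∀ s ∈ ss, s = s0) ∧ (ranksOf cards).Nodup
                then some (ranksOf cards, 0 + cnt64 cards) else none) = none
          rw [if_neg (fun h => hall h.1)]
        rw [hA, hB]
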